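-- pv_equiv track=rewrite | github.com/xikronz/Hydra | scripts/pareto_experiment.py | enumerate_widths_with_node_limit
-- ===== SOURCE A (Python) =====
-- from typing import Any, Dict, List, Tuple
--
-- def enumerate_widths_with_node_limit(depth: int, max_nodes: int) -> List[Tuple[int, ...]]:
--     """Enumerate all width tuples whose full tree has at most max_nodes nodes."""
--     out: List[Tuple[int, ...]] = []
--
--     def rec(prefix: List[int], prod: int, nodes: int):
--         if len(prefix) == depth:
--             out.append(tuple(prefix))
--             return
--         remaining_levels = depth - len(prefix) - 1
--         # Every later level has at least width 1, so reserve its minimum cost.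
--         max_w = max_nodes - nodes - prod * remaining_levels
--         for w in range(1, max_w + 1):
--             next_prod = prod * w
--             next_nodes = nodes + next_prod
--             if next_nodes + next_prod * remaining_levels > max_nodes:
--                 break
--             rec(prefix + [w], next_prod, next_nodes)
--
--     rec([], 1, 0)
--     return out
-- ===== SOURCE B (Python) =====
-- def enumerate_widths_with_node_limit(depth, max_nodes):
--     """Breadth-first, level-by-level enumeration: expand all partial width
--     tuples one level at a time instead of recursing depth-first."""
--     if depth < 0:
--         return []
--     frontier = [((), 1, 0)]
--     for remaining in range(depth - 1, -1, -1):
--         if not frontier: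
--             break
--         nxt = []
--         for prefix, prod, nodes in frontier:
--             w = 1
--             while True:
--                 np_ = prod * w
--                 nn = nodes + np_
--                 if nn + np_ * remaining > max_nodes:
--                     break
--                 nxt.append((prefix + (w,), np_, nn))
--                 w += 1
--         frontier = nxt
--     return [p for p, _, _ in frontier]
-- ===== Notes on version B (the rewrite author's own statement) =====
-- stated objective: alternative
-- what changed: Depth-first recursion with a shared output list is replaced by an iterative breadth-first level-by-level expansion of a frontier of (prefix, prod, nodes) states, with the explicit max_w range bound replaced by the (equivalent) break condition alone; Pre_ excludes only negative depths with max_nodes >= depth, where A recurses forever (RecursionError).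
import Mathlib
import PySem

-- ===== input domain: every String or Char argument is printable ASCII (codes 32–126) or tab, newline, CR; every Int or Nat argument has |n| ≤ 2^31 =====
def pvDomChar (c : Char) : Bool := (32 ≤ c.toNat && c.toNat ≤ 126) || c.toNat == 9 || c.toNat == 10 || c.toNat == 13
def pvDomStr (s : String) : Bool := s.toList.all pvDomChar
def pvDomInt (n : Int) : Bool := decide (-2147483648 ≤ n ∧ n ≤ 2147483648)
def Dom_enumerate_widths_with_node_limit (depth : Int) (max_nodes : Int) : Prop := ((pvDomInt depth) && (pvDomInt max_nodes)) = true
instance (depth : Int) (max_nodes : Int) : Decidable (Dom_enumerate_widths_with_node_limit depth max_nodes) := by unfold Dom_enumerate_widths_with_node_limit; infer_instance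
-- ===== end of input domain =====

-- B replaces A's depth-first recursion by an iterative breadth-first level-by-level
-- expansion (alternative decomposition; return values proved equal on Pre_).

-- ===== PORT A =====
-- Literal port of A's nested recursion; `fuel` (= depth - len(pfx) on every
-- reachable call) only makes the recursion total in Lean — on inputs satisfying
-- Pre_ the fuel-exhaustion branch is never the source of the value except when
-- the Python loop would have been empty anyway (depth < 0, max_nodes < depth).
mutual
def pvARec (depth max_nodes : Int) : Nat → List Int → Int → Int → List (List Int)
  | fuel, pfx, prod, nodes =>
    if (pfx.length : Int) = depth then [pfx]
    else
      match fuel with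
      | 0 => []
      | f + 1 =>
        let rem := depth - (pfx.length : Int) - 1
        let maxw := max_nodes - nodes - prod * rem
        pvAFor depth max_nodes f rem maxw 1 pfx prod nodes
termination_by fuel => (fuel, 0)

-- the `for w in range(1, max_w + 1)` loop with its early break
def pvAFor (depth max_nodes : Int) (f : Nat) (rem maxw w : Int)
    (pfx : List Int) (prod nodes : Int) : List (List Int) :=
  if w > maxw then []
  else
    let np := prod * w
    let nn := nodes + np
    if nn + np * rem > max_nodes then []
    else pvARec depth max_nodes f (pfx ++ [w]) np nn ++
         pvAFor depth max_nodes f rem maxw (w + 1) pfx prod nodes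
termination_by (f, (maxw + 1 - w).toNat + 1)
decreasing_by
  · exact Prod.Lex.right f (Nat.zero_lt_succ _)
  · exact Prod.Lex.right f (by omega)
end

def enumerate_widths_with_node_limit (depth : Int) (max_nodes : Int) : List (List Int) :=
  pvARec depth max_nodes depth.toNat [] 1 0

-- ===== PORT B =====
-- the inner `while True` loop over w; fuel = max_w+1 suffices (proved below)
def pvBChildren (max_nodes rem : Int) : Nat → Int → List Int → Int → Int → List (List Int × Int × Int)
  | 0, _, _, _, _ => []
  | fuel + 1, w, pfx, prod, nodes =>
    let np := prod * w
    let nn := nodes + np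
    if nn + np * rem > max_nodes then []
    else (pfx ++ [w], np, nn) :: pvBChildren max_nodes rem fuel (w + 1) pfx prod nodes

-- `for remaining in range(depth-1, -1, -1)`: k iterations left ⇒ remaining = k-1
def pvBLoop (max_nodes : Int) : Nat → List (List Int × Int × Int) → List (List Int × Int × Int)
  | 0, frontier => frontier
  | _ + 1, [] => []      -- `if not frontier: break` (the remaining levels produce nothing)
  | k + 1, a :: b =>
      pvBLoop max_nodes k
        ((a :: b).flatMap (fun s =>
          pvBChildren max_nodes (k : Int)
            ((max_nodes - s.2.2 - s.2.1 * (k : Int)).toNat + 1) 1 s.1 s.2.1 s.2.2))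

def enumerate_widths_with_node_limit_alt (depth : Int) (max_nodes : Int) : List (List Int) :=
  if depth < 0 then []
  else (pvBLoop max_nodes depth.toNat [([], 1, 0)]).map (·.1)

-- ===== PRECONDITION & SPEC =====
-- Pre_ excludes exactly the inputs on which Python A never returns: for depth < 0
-- with max_nodes ≥ depth the recursion descends forever (RecursionError).
def Pre_enumerate_widths_with_node_limit (depth : Int) (max_nodes : Int) : Prop :=
  0 ≤ depth ∨ max_nodes < depth
instance (depth : Int) (max_nodes : Int) : Decidable (Pre_enumerate_widths_with_node_limit depth max_nodes) := by unfold Pre_enumerate_widths_with_node_limit; infer_instance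

def pvWitness_enumerate_widths_with_node_limit : Int × Int := (2, 7)

def Spec_enumerate_widths_with_node_limit (depth : Int) (max_nodes : Int) (out : List (List Int)) : Prop := out = enumerate_widths_with_node_limit_alt depth max_nodes
instance (depth : Int) (max_nodes : Int) (out : List (List Int)) : Decidable (Spec_enumerate_widths_with_node_limit depth max_nodes out) := by unfold Spec_enumerate_widths_with_node_limit; infer_instance

-- ===== CLAIM (what is proved, stated in full; the proofs are below) =====
def Claim_equal_enumerate_widths_with_node_limit : Prop := ∀ (depth : Int) (max_nodes : Int), Dom_enumerate_widths_with_node_limit depth max_nodes → Pre_enumerate_widths_with_node_limit depth max_nodes → Spec_enumerate_widths_with_node_limit depth max_nodes (enumerate_widths_with_node_limit depth max_nodes)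

-- ===== LEMMAS AND PROOFS =====

theorem pvARec_base (depth max_nodes : Int) (fuel : Nat) (pfx : List Int)
    (prod nodes : Int) (h : (pfx.length : Int) = depth) :
    pvARec depth max_nodes fuel pfx prod nodes = [pfx] := by
  rw [pvARec.eq_def]; simp [h]

theorem pvARec_step (depth max_nodes : Int) (f : Nat) (pfx : List Int)
    (prod nodes : Int) (h : ¬ (pfx.length : Int) = depth) :
    pvARec depth max_nodes (f + 1) pfx prod nodes =
      pvAFor depth max_nodes f (depth - (pfx.length : Int) - 1)
        (max_nodes - nodes - prod * (depth - (pfx.length : Int) - 1)) 1 pfx prod nodes := by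
  rw [pvARec.eq_def]; simp [h]

theorem pvBChildren_shape (max_nodes rem : Int) (fuel : Nat) (w : Int)
    (pfx : List Int) (prod nodes : Int) (hp : 1 ≤ prod) (hw : 1 ≤ w) :
    ∀ s ∈ pvBChildren max_nodes rem fuel w pfx prod nodes,
      s.1.length = pfx.length + 1 ∧ 1 ≤ s.2.1 := by
  induction fuel generalizing w with
  | zero => simp [pvBChildren]
  | succ f ih =>
    simp only [pvBChildren]
    split
    · simp
    · intro s hs
      rcases List.mem_cons.1 hs with h | h
      · subst h
        refine ⟨by simp, by nlinarith⟩
      · exact ih (w + 1) (by omega) s h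

-- the for-loop of A equals flatMap of A's recursion over B's child list
theorem pvAFor_eq_children (depth max_nodes : Int) (f : Nat) (rem : Int)
    (pfx : List Int) (prod nodes : Int) (hrem : 0 ≤ rem) (hp : 1 ≤ prod) :
    ∀ (fuel : Nat) (w : Int), 1 ≤ w →
      max_nodes - nodes - prod * rem - w < (fuel : Int) →
      pvAFor depth max_nodes f rem (max_nodes - nodes - prod * rem) w pfx prod nodes =
        (pvBChildren max_nodes rem fuel w pfx prod nodes).flatMap
          (fun s => pvARec depth max_nodes f s.1 s.2.1 s.2.2) := by
  intro fuel
  induction fuel with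
  | zero =>
    intro w hw hfuel
    rw [pvAFor]
    rw [if_pos (by push_cast at hfuel; omega)]
    simp [pvBChildren]
  | succ fl ih =>
    intro w hw hfuel
    rw [pvAFor, pvBChildren]
    by_cases hbreak : nodes + prod * w + prod * w * rem > max_nodes
    · rw [if_pos hbreak]
      split <;> simp
    · rw [not_lt] at hbreak
      have h1 : 0 ≤ (prod - 1) * w := mul_nonneg (by omega) (by omega)
      have h2 : 0 ≤ prod * rem * (w - 1) :=
        mul_nonneg (mul_nonneg (by omega) hrem) (by omega)
      have hwle : ¬ (w > max_nodes - nodes - prod * rem) := by nlinarith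
      rw [if_neg hwle, if_neg (not_lt.2 hbreak), if_neg (not_lt.2 hbreak), List.flatMap_cons]
      congr 1
      exact ih (w + 1) (by omega) (by push_cast at hfuel ⊢; omega)

-- main invariant: BFS over a frontier equals flatMap of A's recursion over it
theorem pvBLoop_eq (depth max_nodes : Int) :
    ∀ (k : Nat) (frontier : List (List Int × Int × Int)),
      (∀ s ∈ frontier, (s.1.length : Int) = depth - k ∧ 1 ≤ s.2.1) →
      (pvBLoop max_nodes k frontier).map (·.1) =
        frontier.flatMap (fun s => pvARec depth max_nodes k s.1 s.2.1 s.2.2) := by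
  intro k
  induction k with
  | zero =>
    intro frontier hf
    rw [pvBLoop]
    induction frontier with
    | nil => simp
    | cons s t iht =>
      have hs := hf s (List.mem_cons_self ..)
      simp only [List.map_cons, List.flatMap_cons]
      rw [pvARec_base depth max_nodes 0 s.1 s.2.1 s.2.2 (by push_cast at hs ⊢; omega)]
      simp only [List.singleton_append, List.cons.injEq]
      exact ⟨trivial, iht (fun x hx => hf x (List.mem_cons_of_mem _ hx))⟩
  | succ k ih =>
    intro frontier hf
    match frontier with
    | [] => simp [pvBLoop]
    | a :: b =>
    rw [pvBLoop]
    rw [ih _ ?_]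
    · -- per-frontier-element: expanding then recursing = one step of A's recursion
      rw [List.flatMap_assoc]
      apply List.flatMap_congr
      intro s hs
      have hsf := hf s hs
      have hlen : depth - (s.1.length : Int) - 1 = (k : Int) := by
        push_cast at hsf ⊢; omega
      rw [pvARec_step depth max_nodes k s.1 s.2.1 s.2.2 (by push_cast at hsf; omega), hlen]
      exact pvAFor_eq_children depth max_nodes k (k : Int) s.1 s.2.1 s.2.2
        (by positivity) hsf.2 ((max_nodes - s.2.2 - s.2.1 * (k : Int)).toNat + 1) 1
        le_rfl (by push_cast; omega) |>.symm
    · intro s hs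
      rcases List.mem_flatMap.1 hs with ⟨t, ht, hst⟩
      have htf := hf t ht
      have := pvBChildren_shape max_nodes (k : Int) _ 1 t.1 t.2.1 t.2.2 htf.2 le_rfl s hst
      constructor
      · push_cast [this.1]; push_cast at htf; omega
      · exact this.2

-- ===== VERDICT (by name: the statement is the Claim_ definition above) =====
theorem enumerate_widths_with_node_limit_spec : Claim_equal_enumerate_widths_with_node_limit := by
  intro depth max_nodes _ _
  unfold Spec_enumerate_widths_with_node_limit enumerate_widths_with_node_limit enumerate_widths_with_node_limit_alt
  by_cases hd : depth < 0
  · rw [if_pos hd, pvARec.eq_def]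
    have h0 : depth.toNat = 0 := by omega
    rw [h0]
    simp only [List.length_nil, Nat.cast_zero]
    rw [if_neg (by omega)]
  · rw [if_neg hd]
    rw [pvBLoop_eq depth max_nodes depth.toNat [([], 1, 0)]
      (by
        intro s hs; simp at hs; subst hs
        refine ⟨by simp only [List.length_nil, Nat.cast_zero]; omega, le_rfl⟩)]
    simp
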